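-- pv_equiv track=rewrite | github.com/Sheepybloke2-0/sbom-visualizer | sbom_visualizer/core/analyzer.py | _calculate_package_depth
-- ===== SOURCE A (Python) =====
-- from typing import Dict, List
--
-- def _calculate_package_depth(
--     package_id: str, dependency_graph: Dict[str, List[str]]
-- ) -> int:
--     """Calculate the maximum depth of a package in the dependency tree."""
--     visited = set()
--
--     def dfs(node: str, depth: int) -> int:
--         if node in visited:
--             return depth
--         visited.add(node)
--
--         max_depth = depth
--         for dep in dependency_graph.get(node, []):
--             max_depth = max(max_depth, dfs(dep, depth + 1))
--
--         return max_depth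
--
--     return dfs(package_id, 0)
-- ===== SOURCE B (Python) =====
-- from typing import Dict, List
--
--
-- def _calculate_package_depth(
--     package_id: str, dependency_graph: Dict[str, List[str]]
-- ) -> int:
--     """Iterative DFS with an explicit (node, depth) stack instead of recursion."""
--     visited = set()
--     stack = [(package_id, 0)]
--     max_depth = 0
--     while stack:
--         node, depth = stack.pop()
--         if depth > max_depth:
--             max_depth = depth
--         if node in visited:
--             continue
--         visited.add(node)
--         for dep in reversed(dependency_graph.get(node, [])):
--             stack.append((dep, depth + 1))
--     return max_depth
-- ===== Notes on version B (the rewrite author's own statement) =====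
-- stated objective: alternative
-- what changed: Replaces A's recursive DFS helper (closure-mutated visited set) with an iterative DFS over an explicit (node, depth) stack and a running max: dependencies are pushed in reversed order and nodes are marked visited at pop time, so the traversal and the shared-visited-set depth contributions are identical.
import Mathlib
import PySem

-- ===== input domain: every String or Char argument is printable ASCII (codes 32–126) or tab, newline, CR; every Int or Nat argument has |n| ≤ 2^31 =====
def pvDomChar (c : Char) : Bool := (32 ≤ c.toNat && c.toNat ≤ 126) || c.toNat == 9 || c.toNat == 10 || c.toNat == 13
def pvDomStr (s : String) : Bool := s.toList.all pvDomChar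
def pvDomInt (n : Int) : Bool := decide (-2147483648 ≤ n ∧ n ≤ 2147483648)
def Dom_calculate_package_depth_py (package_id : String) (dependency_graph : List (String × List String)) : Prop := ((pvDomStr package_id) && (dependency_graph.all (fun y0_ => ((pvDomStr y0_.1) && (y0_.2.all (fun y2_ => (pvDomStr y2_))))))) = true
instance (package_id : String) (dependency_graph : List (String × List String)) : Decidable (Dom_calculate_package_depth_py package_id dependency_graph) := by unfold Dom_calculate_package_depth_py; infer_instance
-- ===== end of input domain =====

-- B replaces A's recursive DFS (closure-mutated visited set) by an iterative DFS with an
-- explicit (node, depth) stack; same results, no recursion ("alternative", not claimed faster).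

-- dependency_graph.get(node, [])
def pvDeps (G : List (String × List String)) (n : String) : List String :=
  (PySem.Dict.mk G).getD n []

-- all dependency names occurring as values of the graph
def pvValsFlat (G : List (String × List String)) : List String :=
  (G.map Prod.snd).flatten

-- every result of pvDeps is a value of the graph (needed by pvRunB's termination measure)
theorem pvDeps_subset (G : List (String × List String)) (n : String) :
    ∀ x ∈ pvDeps G n, x ∈ pvValsFlat G := by
  intro x hx
  unfold pvDeps at hx
  rw [PySem.Dict.getD_eq_get?_getD] at hx
  cases h : (PySem.Dict.mk G).get? n with
  | none => rw [h] at hx; simp at hx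
  | some v =>
    rw [h] at hx; simp at hx
    have hmem := PySem.Dict.mem_items_of_get?_eq_some (PySem.Dict.mk G) h
    exact List.mem_flatten.2 ⟨v, List.mem_map_of_mem hmem, hx⟩

-- ===== PORT A =====
-- A's inner `dfs`: the closure-mutated `visited` set is threaded as state, the `for dep …`
-- loop is the foldl over the same accumulator (max_depth, visited); `fuel` only makes the
-- recursion structural — the top-level call supplies fuel proven sufficient below.
def pvDfsA (G : List (String × List String)) : Nat → String → Int → PySem.Set String → Int × PySem.Set String
  | 0, _, d, V => (d, V)
  | f+1, n, d, V =>
    if V.contains n then (d, V)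
    else
      (pvDeps G n).foldl
        (fun acc dep =>
          let r := pvDfsA G f dep (d+1) acc.2
          (max acc.1 r.1, r.2))
        (d, V.add n)
termination_by f => f

def calculate_package_depth_py (package_id : String) (dependency_graph : List (String × List String)) : Int :=
  (pvDfsA dependency_graph ((pvValsFlat dependency_graph).length + 2) package_id 0 PySem.Set.empty).1

-- ===== PORT B =====
-- distinct nodes (stack ++ graph values) not yet visited: termination measure for the loop
def pvUnvis (G : List (String × List String)) (st : List (String × Int)) (V : PySem.Set String) : Nat :=
  ((st.map Prod.fst ++ pvValsFlat G).toFinset.filter (fun x => x ∉ V)).card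

theorem pvUnvis_pop_le (G : List (String × List String)) (n : String) (d : Int)
    (st : List (String × Int)) (V : PySem.Set String) :
    pvUnvis G st V ≤ pvUnvis G ((n, d) :: st) V := by
  apply Finset.card_le_card
  apply Finset.filter_subset_filter
  intro x hx
  simp only [List.toFinset_append, Finset.mem_union, List.mem_toFinset, List.map_cons,
    List.mem_cons] at hx ⊢
  tauto

theorem pvUnvis_push_lt (G : List (String × List String)) (n : String) (d dc : Int)
    (st : List (String × Int)) (V : PySem.Set String) (hv : V.contains n = false) :
    pvUnvis G ((pvDeps G n).map (fun dep => (dep, dc)) ++ st) (V.add n)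
      < pvUnvis G ((n, d) :: st) V := by
  have hnot : n ∉ V := by
    intro h
    simp [PySem.Set.contains] at hv
    exact hv h
  apply Finset.card_lt_card
  constructor
  · intro x hx
    simp only [Finset.mem_filter, List.mem_toFinset] at hx ⊢
    obtain ⟨hx1, hx2⟩ := hx
    have hx2' : x ∉ V := fun h => hx2 ((PySem.Set.mem_add V n x).2 (Or.inl h))
    refine ⟨?_, hx2'⟩
    rw [List.map_cons, List.cons_append, List.mem_cons]
    rcases List.mem_append.1 hx1 with h | h
    · rw [List.map_append, List.map_map] at h
      rcases List.mem_append.1 h with h2 | h2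
      · rcases List.mem_map.1 h2 with ⟨dep, hdep, hEq⟩
        have hxd : x = dep := by simpa using hEq.symm
        exact Or.inr (List.mem_append.2 (Or.inr (hxd ▸ pvDeps_subset G n dep hdep)))
      · exact Or.inr (List.mem_append.2 (Or.inl h2))
    · exact Or.inr (List.mem_append.2 (Or.inr h))
  · intro hsub
    have hn : n ∈ Finset.filter (fun x => x ∉ V) ((((n, d) :: st).map Prod.fst ++ pvValsFlat G).toFinset) := by
      simp [hnot]
    have := hsub hn
    simp only [Finset.mem_filter] at this
    exact this.2 ((PySem.Set.mem_add V n n).2 (Or.inr rfl))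

-- B: iterative DFS — pop (node, depth), fold the depth into the running max, skip visited
-- nodes, otherwise mark visited and push the dependencies (reversed in the Python so that
-- the head of this list is the next node popped).
def pvRunB (G : List (String × List String)) : List (String × Int) → PySem.Set String → Int → Int
  | [], _, m => m
  | (n, d) :: st, V, m =>
    let m' := max m d
    if hv : V.contains n then pvRunB G st V m'
    else pvRunB G ((pvDeps G n).map (fun dep => (dep, d+1)) ++ st) (V.add n) m'
termination_by st V _ => (pvUnvis G st V, st.length)
decreasing_by
  · rcases lt_or_eq_of_le (pvUnvis_pop_le G n d st V) with h | h
    · exact Prod.Lex.left _ _ h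
    · rw [h]; exact Prod.Lex.right _ (Nat.lt_succ_self _)
  · exact Prod.Lex.left _ _ (pvUnvis_push_lt G n d (d+1) st V (by simpa using hv))

def calculate_package_depth_py_alt (package_id : String) (dependency_graph : List (String × List String)) : Int :=
  pvRunB dependency_graph [(package_id, 0)] PySem.Set.empty 0

-- ===== PRECONDITION & SPEC =====
def Spec_calculate_package_depth_py (package_id : String) (dependency_graph : List (String × List String)) (out : Int) : Prop := out = calculate_package_depth_py_alt package_id dependency_graph
instance (package_id : String) (dependency_graph : List (String × List String)) (out : Int) : Decidable (Spec_calculate_package_depth_py package_id dependency_graph out) := by unfold Spec_calculate_package_depth_py; infer_instance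

-- ===== CLAIM (what is proved, stated in full; the proofs are below) =====
def Claim_equal_calculate_package_depth_py : Prop := ∀ (package_id : String) (dependency_graph : List (String × List String)), Dom_calculate_package_depth_py package_id dependency_graph → Spec_calculate_package_depth_py package_id dependency_graph (calculate_package_depth_py package_id dependency_graph)

-- ===== LEMMAS AND PROOFS =====

-- the fold inside pvDfsA, named so lemmas can speak about it
def pvFoldA (G : List (String × List String)) (f : Nat) (dc : Int)
    (acc : Int × PySem.Set String) (deps : List String) : Int × PySem.Set String :=
  deps.foldl
    (fun acc dep =>
      let r := pvDfsA G f dep dc acc.2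
      (max acc.1 r.1, r.2))
    acc

theorem pvDfsA_succ (G : List (String × List String)) (f : Nat) (n : String) (d : Int)
    (V : PySem.Set String) :
    pvDfsA G (f+1) n d V =
      if V.contains n then (d, V)
      else pvFoldA G f (d+1) (d, V.add n) (pvDeps G n) := by
  rw [pvDfsA, pvFoldA]

-- accumulator is a lower bound of the fold's max
theorem pvFoldA_le (G : List (String × List String)) (f : Nat) (dc : Int) :
    ∀ (deps : List String) (acc : Int × PySem.Set String), acc.1 ≤ (pvFoldA G f dc acc deps).1 := by
  intro deps
  induction deps with
  | nil => intro acc; simp [pvFoldA]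
  | cons dep rest ih =>
    intro acc
    have := ih (max acc.1 (pvDfsA G f dep dc acc.2).1, (pvDfsA G f dep dc acc.2).2)
    simp only [pvFoldA, List.foldl_cons] at *
    exact le_trans (le_max_left _ _) this

-- d is a lower bound of dfs's result
theorem pvDfsA_le (G : List (String × List String)) :
    ∀ (f : Nat) (n : String) (d : Int) (V : PySem.Set String), d ≤ (pvDfsA G f n d V).1 := by
  intro f n d V
  cases f with
  | zero => simp [pvDfsA]
  | succ g =>
    rw [pvDfsA_succ]
    split
    · simp
    · exact pvFoldA_le G g (d+1) (pvDeps G n) (d, V.add n)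

-- visited only grows
theorem pvDfsA_mono (G : List (String × List String)) :
    ∀ (f : Nat) (n : String) (d : Int) (V : PySem.Set String) (x : String),
      x ∈ V → x ∈ (pvDfsA G f n d V).2 := by
  intro f
  induction f with
  | zero => intro n d V x hx; simpa [pvDfsA] using hx
  | succ g ih =>
    intro n d V x hx
    rw [pvDfsA_succ]
    split
    · exact hx
    · have hadd : x ∈ V.add n := (PySem.Set.mem_add V n x).2 (Or.inl hx)
      -- fold preserves membership
      have : ∀ (deps : List String) (acc : Int × PySem.Set String), x ∈ acc.2 → x ∈ (pvFoldA G g (d+1) acc deps).2 := by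
        intro deps
        induction deps with
        | nil => intro acc h; simpa [pvFoldA] using h
        | cons dep rest ihr =>
          intro acc h
          simp only [pvFoldA, List.foldl_cons] at *
          exact ihr _ (ih dep (d+1) acc.2 x h)
      exact this (pvDeps G n) (d, V.add n) hadd

-- count of U-elements not yet visited (fuel bound)
def pvUCount (U : List String) (V : PySem.Set String) : Nat :=
  (U.toFinset.filter (fun x => x ∉ V)).card

theorem pvUCount_le_of_subset (U : List String) (V V' : PySem.Set String)
    (h : ∀ x, x ∈ V → x ∈ V') : pvUCount U V' ≤ pvUCount U V := by
  apply Finset.card_le_card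
  intro x hx
  simp only [Finset.mem_filter] at hx ⊢
  exact ⟨hx.1, fun hv => hx.2 (h x hv)⟩

theorem pvUCount_add_lt (U : List String) (V : PySem.Set String) (n : String)
    (hn : n ∈ U) (hv : n ∉ V) : pvUCount U (V.add n) < pvUCount U V := by
  apply Finset.card_lt_card
  constructor
  · intro x hx
    simp only [Finset.mem_filter] at hx ⊢
    exact ⟨hx.1, fun h => hx.2 ((PySem.Set.mem_add V n x).2 (Or.inl h))⟩
  · intro hsub
    have h1 : n ∈ U.toFinset.filter (fun x => x ∉ V) := by simp [hn, hv]
    have := hsub h1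
    simp only [Finset.mem_filter] at this
    exact this.2 ((PySem.Set.mem_add V n n).2 (Or.inr rfl))

-- Bool/Prop bridge for Set.contains
theorem pvContains_iff (V : PySem.Set String) (x : String) : V.contains x = true ↔ x ∈ V := by
  simp [PySem.Set.contains]

-- THE SIMULATION: running B's loop with (n,d) on top of the stack is running A's dfs on
-- (n,d) and continuing with the rest of the stack, the visited set it built, and its max.
theorem pvSim (G : List (String × List String)) (U : List String)
    (hU : ∀ k x, x ∈ pvDeps G k → x ∈ U) :
    ∀ (f : Nat) (n : String) (d : Int) (V : PySem.Set String) (st : List (String × Int)) (m : Int),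
      n ∈ U → pvUCount U V + 1 ≤ f →
      pvRunB G ((n, d) :: st) V m
        = pvRunB G st (pvDfsA G f n d V).2 (max m (pvDfsA G f n d V).1) := by
  intro f
  induction f using Nat.strong_induction_on with
  | _ f IH =>
    intro n d V st m hn hf
    obtain ⟨g, rfl⟩ : ∃ g, f = g + 1 := ⟨f - 1, by omega⟩
    rw [pvDfsA_succ]
    by_cases hm : n ∈ V
    · have hv : V.contains n = true := (pvContains_iff V n).2 hm
      rw [pvRunB]; simp [hm]
    · -- inner simulation over the dependency list
      have hfresh : n ∉ V := hm
      have hv : V.contains n = false := by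
        cases h : V.contains n
        · rfl
        · exact absurd ((pvContains_iff V n).1 h) hm
      have hg : pvUCount U (V.add n) + 1 ≤ g := by
        have := pvUCount_add_lt U V n hn hfresh
        omega
      have simList : ∀ (deps : List String), (∀ x ∈ deps, x ∈ U) →
          ∀ (V' : PySem.Set String) (st' : List (String × Int)) (mr macc : Int),
            pvUCount U V' + 1 ≤ g → macc ≤ mr →
            pvRunB G (deps.map (fun dep => (dep, d+1)) ++ st') V' mr
              = pvRunB G st' (pvFoldA G g (d+1) (macc, V') deps).2
                  (max mr (pvFoldA G g (d+1) (macc, V') deps).1) := by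
        intro deps
        induction deps with
        | nil =>
          intro _ V' st' mr macc _ hle
          simp [pvFoldA, max_eq_left hle]
        | cons dep rest ihr =>
          intro hmem V' st' mr macc hg' hle
          have hdep : dep ∈ U := hmem dep (List.mem_cons_self ..)
          simp only [List.map_cons, List.cons_append]
          rw [IH g (Nat.lt_succ_self g) dep (d+1) V' _ mr hdep hg']
          set r := pvDfsA G g dep (d+1) V' with hr
          have hg'' : pvUCount U r.2 + 1 ≤ g :=
            le_trans (by
              have := pvUCount_le_of_subset U V' r.2 (fun x hx => pvDfsA_mono G g dep (d+1) V' x hx)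
              omega) hg'
          rw [ihr (fun x hx => hmem x (List.mem_cons_of_mem _ hx)) r.2 st' (max mr r.1) (max macc r.1) hg''
            (max_le_max hle le_rfl)]
          have hbound : r.1 ≤ (pvFoldA G g (d+1) (max macc r.1, r.2) rest).1 :=
            le_trans (le_max_right _ _) (pvFoldA_le G g (d+1) rest (max macc r.1, r.2))
          have : max (max mr r.1) (pvFoldA G g (d+1) (max macc r.1, r.2) rest).1
              = max mr (pvFoldA G g (d+1) (max macc r.1, r.2) rest).1 := by
            rw [max_assoc, max_eq_right hbound]
          rw [this]
          have hfold : pvFoldA G g (d+1) (macc, V') (dep :: rest)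
              = pvFoldA G g (d+1) (max macc r.1, r.2) rest := by
            simp only [pvFoldA, List.foldl_cons]
            rw [← hr]
          rw [hfold]
      rw [pvRunB]
      simp only [hv, Bool.false_eq_true, if_false]
      have := simList (pvDeps G n) (fun x hx => hU n x hx) (V.add n) st (max m d) d hg (le_max_right m d)
      rw [this]
      have hbound : d ≤ (pvFoldA G g (d+1) (d, V.add n) (pvDeps G n)).1 :=
        pvFoldA_le G g (d+1) (pvDeps G n) (d, V.add n)
      rw [max_assoc, max_eq_right hbound]
      simp

-- ===== VERDICT (by name: the statement is the Claim_ definition above) =====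
theorem calculate_package_depth_py_spec : Claim_equal_calculate_package_depth_py := by
  intro pid G _
  unfold Spec_calculate_package_depth_py calculate_package_depth_py calculate_package_depth_py_alt
  have hU : ∀ k x, x ∈ pvDeps G k → x ∈ pid :: pvValsFlat G := by
    intro k x hx
    exact List.mem_cons_of_mem _ (pvDeps_subset G k x hx)
  have hcount : pvUCount (pid :: pvValsFlat G) PySem.Set.empty + 1 ≤ (pvValsFlat G).length + 2 := by
    unfold pvUCount
    have h1 : ((pid :: pvValsFlat G).toFinset.filter (fun x => x ∉ PySem.Set.empty)).card
        ≤ (pid :: pvValsFlat G).toFinset.card := Finset.card_filter_le _ _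
    have h2 := List.toFinset_card_le (pid :: pvValsFlat G)
    simp only [List.length_cons] at h2
    omega
  have := pvSim G (pid :: pvValsFlat G) hU ((pvValsFlat G).length + 2) pid 0 PySem.Set.empty [] 0
    (List.mem_cons_self ..) hcount
  rw [this, pvRunB, max_eq_right (pvDfsA_le G _ pid 0 PySem.Set.empty)]
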